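-- pv_equiv track=rewrite | github.com/Divyam989/dna-storage-device | dna_logic.py | strip_parity
-- ===== SOURCE A (Python) =====
-- def strip_parity(dna: str) -> tuple[str, list[int], int]:
--     """
--     Remove parity bases (every 9th position) and verify them.
--     Returns (data_dna, error_block_indices, total_blocks_checked).
--     """
--     data_bases = []
--     errors     = []
--     total      = 0
--     for i in range(0, len(dna), 9):
--         block = dna[i:i+8]
--         pb    = dna[i+8] if i+8 < len(dna) else None
--         data_bases.append(block)
--         if pb is not None:
--             total += 1
--             gc = sum(1 for b in block if b in ("G", "C"))
--             expected = "A" if gc % 2 == 0 else "T"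
--             if pb != expected:
--                 errors.append(total)
--     return "".join(data_bases), errors, total
-- ===== SOURCE B (Python) =====
-- def strip_parity(dna: str) -> tuple[str, list[int], int]:
--     """Single left-to-right pass: running GC counter, parity checked at every
--     index j with j % 9 == 8, counter reset after each parity base."""
--     data = []
--     errors = []
--     total = 0
--     gcount = 0
--     for j, ch in enumerate(dna):
--         if j % 9 == 8:
--             total += 1
--             expected = "A" if gcount % 2 == 0 else "T"
--             if ch != expected:
--                 errors.append(total)
--             gcount = 0
--         else:
--             data.append(ch)
--             if ch in ("G", "C"):
--                 gcount += 1
--     return "".join(data), errors, total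
-- ===== Notes on version B (the rewrite author's own statement) =====
-- stated objective: alternative
-- what changed: Replaces the stride-9 loop over slices (block slice + lookahead parity index per iteration) with a single character-by-character pass keeping a running GC counter that is checked and reset at every index j with j % 9 == 8.
import Mathlib
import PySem

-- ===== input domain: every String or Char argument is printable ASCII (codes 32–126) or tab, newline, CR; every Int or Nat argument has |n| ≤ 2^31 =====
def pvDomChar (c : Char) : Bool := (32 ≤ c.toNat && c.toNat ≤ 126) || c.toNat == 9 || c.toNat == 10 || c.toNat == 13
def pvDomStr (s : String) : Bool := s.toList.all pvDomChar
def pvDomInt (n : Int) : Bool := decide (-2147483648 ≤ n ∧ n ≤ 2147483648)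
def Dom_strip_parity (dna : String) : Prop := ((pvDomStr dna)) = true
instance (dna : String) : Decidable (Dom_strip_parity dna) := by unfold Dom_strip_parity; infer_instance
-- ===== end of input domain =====

-- B is an alternative single-pass decomposition (running GC counter, parity at j % 9 == 8)
-- instead of A's stride-9 loop over slices; same cost, equivalence proved on all inputs.

-- `b in ("G", "C")` for a single base
def pvGC (c : Char) : Bool := c == 'G' || c == 'C'

-- ===== PORT A =====
-- the loop `for i in range(0, len(dna), 9)` as the obvious recursion over the
-- remaining suffix: block = dna[i:i+8] = rem.take 8, dna[i+8] (guarded) = rem[8]?,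
-- next iteration works on rem.drop 9
def stripParityA_go (rem : List Char) (data : List (List Char)) (errors : List Int)
    (total : Int) : String × List Int × Int :=
  if _h : rem = [] then (String.ofList data.flatten, errors, total)
  else
    let block := rem.take 8
    let data' := data ++ [block]
    match rem[8]? with
    | none => stripParityA_go (rem.drop 9) data' errors total
    | some pb =>
      let total' := total + 1
      let gc := block.countP pvGC
      let expected := if gc % 2 == 0 then 'A' else 'T'
      let errors' := if pb != expected then errors ++ [total'] else errors
      stripParityA_go (rem.drop 9) data' errors' total'
termination_by rem.length
decreasing_by
  all_goals simp [List.length_drop]; cases rem <;> simp_all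

def strip_parity (dna : String) : String × List Int × Int :=
  stripParityA_go dna.toList [] [] 0

-- ===== PORT B =====
-- B's `for j, ch in enumerate(dna)` loop: one char per step, running gc counter
def stripParityB_go (rem : List Char) (j : Nat) (data : List Char) (errors : List Int)
    (total : Int) (gc : Nat) : String × List Int × Int :=
  match rem with
  | [] => (String.ofList data, errors, total)
  | c :: rest =>
    if j % 9 == 8 then
      let total' := total + 1
      let expected := if gc % 2 == 0 then 'A' else 'T'
      let errors' := if c != expected then errors ++ [total'] else errors
      stripParityB_go rest (j + 1) data errors' total' 0
    else
      stripParityB_go rest (j + 1) (data ++ [c]) errors total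
        (if pvGC c then gc + 1 else gc)

def strip_parity_alt (dna : String) : String × List Int × Int :=
  stripParityB_go dna.toList 0 [] [] 0 0

-- ===== PRECONDITION & SPEC =====
def Spec_strip_parity (dna : String) (out : String × List Int × Int) : Prop := out = strip_parity_alt dna
instance (dna : String) (out : String × List Int × Int) : Decidable (Spec_strip_parity dna out) := by unfold Spec_strip_parity; infer_instance

-- ===== CLAIM (what is proved, stated in full; the proofs are below) =====
def Claim_equal_strip_parity : Prop := ∀ (dna : String), Dom_strip_parity dna → Spec_strip_parity dna (strip_parity dna)

-- ===== LEMMAS AND PROOFS =====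

-- B's pass over a run of non-parity positions just accumulates the chars and their GC count
lemma stepBlock (bs : List Char) : ∀ (rest : List Char) (j : Nat) (data : List Char)
    (e : List Int) (t : Int) (g : Nat), j % 9 + bs.length ≤ 8 →
    stripParityB_go (bs ++ rest) j data e t g
      = stripParityB_go rest (j + bs.length) (data ++ bs) e t (g + bs.countP pvGC) := by
  induction bs with
  | nil => intro rest j data e t g _; simp
  | cons c bs ih =>
    intro rest j data e t g h
    have hj : j % 9 ≠ 8 := by simp at h; omega
    have hj1 : (j + 1) % 9 + bs.length ≤ 8 := by simp at h ⊢; omega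
    simp only [List.cons_append, stripParityB_go]
    rw [if_neg (by simpa using hj)]
    rw [ih rest (j + 1) (data ++ [c]) e t _ hj1]
    rw [show j + 1 + bs.length = j + (c :: bs).length by simp; omega]
    rw [show (data ++ [c]) ++ bs = data ++ (c :: bs) by simp]
    rw [show (if pvGC c then g + 1 else g) + List.countP pvGC bs
          = g + List.countP pvGC (c :: bs) from by
        rw [List.countP_cons]; split_ifs <;> omega]

lemma main (n : Nat) : ∀ (rem : List Char), rem.length ≤ n →
    ∀ (j : Nat) (data : List (List Char)) (e : List Int) (t : Int), j % 9 = 0 →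
    stripParityA_go rem data e t = stripParityB_go rem j data.flatten e t 0 := by
  induction n with
  | zero =>
    intro rem h j data e t hj
    have : rem = [] := by cases rem <;> simp_all
    subst this
    rw [stripParityA_go]
    simp [stripParityB_go]
  | succ n ih =>
    intro rem h j data e t hj
    by_cases hnil : rem = []
    · subst hnil; rw [stripParityA_go]; simp [stripParityB_go]
    by_cases hlen : rem.length ≤ 8
    · -- final partial block: no parity base
      have h8 : rem[8]? = none := by
        apply List.getElem?_eq_none; omega
      rw [stripParityA_go]
      rw [dif_neg hnil]
      simp only [h8]
      have hdrop : rem.drop 9 = [] := by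
        apply List.drop_eq_nil_of_le; omega
      rw [hdrop, stripParityA_go]
      have := stepBlock rem [] j data.flatten e t 0 (by omega)
      simp at this
      rw [this]
      simp [stripParityB_go, List.take_of_length_le hlen]
    · -- full block of 8 data bases plus a parity base
      rw [Nat.not_le] at hlen
      obtain ⟨c, rest, hdec⟩ : ∃ c rest, rem.drop 8 = c :: rest := by
        cases hd : rem.drop 8 with
        | nil => exfalso; have := congrArg List.length hd; simp at this; omega
        | cons c rest => exact ⟨c, rest, rfl⟩
      have hsplit : rem = rem.take 8 ++ c :: rest := by
        conv_lhs => rw [← List.take_append_drop 8 rem]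
        rw [hdec]
      have hbs : (rem.take 8).length = 8 := by simp; omega
      have h8 : rem[8]? = some c := by
        rw [hsplit, List.getElem?_append_right (by omega)]
        simp [hbs]
      have hdrop9 : rem.drop 9 = rest := by
        have h99 : rem.drop 9 = (rem.drop 8).drop 1 := by rw [List.drop_drop]
        rw [h99, hdec]; rfl
      have hrest : rest.length ≤ n := by
        have := congrArg List.length hsplit
        simp [hbs] at this
        omega
      have h88 : (j + 8) % 9 = 8 := by omega
      have h90 : (j + 8 + 1) % 9 = 0 := by omega
      rw [stripParityA_go, dif_neg hnil]
      simp only [h8, hdrop9]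
      rw [ih rest hrest (j + 8 + 1) (data ++ [rem.take 8]) _ _ h90]
      conv_rhs => rw [hsplit]
      rw [stepBlock (rem.take 8) (c :: rest) j data.flatten e t 0 (by rw [hbs]; omega)]
      rw [stripParityB_go]
      simp only [List.length_take, show min 8 rem.length = 8 by omega, Nat.zero_add,
        h88, BEq.rfl, if_true]
      simp

theorem strip_parity_spec_aux (dna : String) :
    strip_parity dna = strip_parity_alt dna := by
  unfold strip_parity strip_parity_alt
  have := main dna.toList.length dna.toList (le_refl _) 0 [] [] 0 (by decide)
  simpa using this

-- ===== VERDICT (by name: the statement is the Claim_ definition above) =====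
theorem strip_parity_spec : Claim_equal_strip_parity := by
  intro dna _
  exact strip_parity_spec_aux dna
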